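-- pv_equiv track=rewrite | github.com/julian-reed/advent-of-code | 2025/day-12/part1.py | find_and_add
-- ===== SOURCE A (Python) =====
-- from copy import deepcopy
--
-- def find_and_add(grid, orientations) -> list:
--     grids = []
--     for r in range(len(grid)):
--         for c in range(len(grid[0])):
--             for cur_shape in orientations:
--                 test = deepcopy(grid)
--                 broken = False
--                 for sr in range(len(cur_shape)):
--                     if broken:
--                         break
--                     for sc in range(len(cur_shape[0])):
--                         if cur_shape[sr][sc] == 1:
--                             if r+sr >= len(test) or c+sc >= len(test[0]) or test[r + sr][c + sc] == 1:
--                                 broken = True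
--                                 del test
--                                 break
--                             else:
--                                 test[r+sr][c+sc] = 1
--                 if broken:
--                     continue
--                 # if merging the current shape was never broken, then we have a valid location
--                 grids.append(test)
--     return grids
-- ===== SOURCE B (Python) =====
-- def find_and_add(grid, orientations):
--     if not grid or not grid[0]:
--         return []
--     R = len(grid)
--     C = len(grid[0])
--     # Per orientation: 1-cell offsets, bounding extents, and the set of anchors
--     # blocked by an existing 1 in the grid (reverse correlation: each grid 1-cell
--     # at (i, j) forbids anchor (i - sr, j - sc) for every shape 1-cell (sr, sc)).
--     tables = []
--     for shape in orientations:
--         offs = [(sr, sc)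
--                 for sr in range(len(shape))
--                 for sc in range(len(shape[0]))
--                 if shape[sr][sc] == 1]
--         blocked = {(i - sr, j - sc)
--                    for i, row in enumerate(grid)
--                    for j in range(min(len(row), C))
--                    if row[j] == 1
--                    for sr, sc in offs}
--         max_sr = max((sr for sr, _ in offs), default=0)
--         max_sc = max((sc for _, sc in offs), default=0)
--         tables.append((offs, max_sr, max_sc, blocked))
--     out = []
--     for r in range(R):
--         for c in range(C):
--             for offs, max_sr, max_sc, blocked in tables:
--                 if r + max_sr < R and c + max_sc < C and (r, c) not in blocked:
--                     new = [row[:] for row in grid]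
--                     for sr, sc in offs:
--                         new[r + sr][c + sc] = 1
--                     out.append(new)
--     return out
-- ===== Notes on version B (the rewrite author's own statement) =====
-- stated objective: alternative
-- what changed: B inverts the placement test: per orientation it builds, from the grid's 1-cells, a set of blocked anchors (each grid 1-cell at (i,j) forbids anchor (i-sr,j-sc) for every shape 1-cell) plus max-offset bounds, so validity at an anchor is one set lookup and two comparisons instead of A's deepcopy-then-scan of the whole shape rectangle at every position.
import Mathlib
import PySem

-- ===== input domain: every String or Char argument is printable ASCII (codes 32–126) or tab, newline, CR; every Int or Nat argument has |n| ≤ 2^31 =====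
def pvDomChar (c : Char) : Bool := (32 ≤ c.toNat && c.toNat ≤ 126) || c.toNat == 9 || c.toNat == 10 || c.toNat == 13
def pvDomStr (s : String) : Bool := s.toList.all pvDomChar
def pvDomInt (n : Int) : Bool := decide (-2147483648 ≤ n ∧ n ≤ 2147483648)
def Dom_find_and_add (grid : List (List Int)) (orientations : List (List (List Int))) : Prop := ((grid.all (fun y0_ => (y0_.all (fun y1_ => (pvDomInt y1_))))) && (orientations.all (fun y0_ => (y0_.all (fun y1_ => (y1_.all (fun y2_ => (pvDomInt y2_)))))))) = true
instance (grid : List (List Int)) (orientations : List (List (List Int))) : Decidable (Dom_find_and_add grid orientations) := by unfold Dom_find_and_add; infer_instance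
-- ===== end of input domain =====

-- B inverts the placement test: each orientation gets a set of anchors blocked by the grid's 1-cells
-- (built by scanning the GRID's 1-cells once per orientation, not the shape per anchor) plus an
-- arithmetic bounds check from the offsets' maxima, so the per-anchor shape scan and the per-anchor
-- deepcopy of A disappear; return-value equivalence only (neither mutates its arguments).

-- ===== PORT A =====
-- test[i][j] = 1 (functional row update; in Python the copy `test` is mutated in place)
def pvWrite (t : List (List Int)) (i j : Nat) : List (List Int) :=
  t.set i ((t.getD i []).set j 1)

-- A's sr/sc double loop over the shape rectangle; the `broken` flag is the Option state
def pvAInner (r c : Nat) (shape : List (List Int)) (t0 : List (List Int)) :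
    Option (List (List Int)) :=
  (List.range shape.length).foldl (fun st sr =>
    (List.range (shape.headD []).length).foldl (fun st2 sc =>
      match st2 with
      | none => none
      | some t =>
        if (shape.getD sr []).getD sc 0 = 1 then
          if t.length ≤ r + sr ∨ (t.headD []).length ≤ c + sc ∨
              (t.getD (r + sr) []).getD (c + sc) 0 = 1 then none
          else some (pvWrite t (r + sr) (c + sc))
        else st2) st) (some t0)

def find_and_add (grid : List (List Int)) (orientations : List (List (List Int))) :
    List (List (List Int)) :=
  (List.range grid.length).foldl (fun grids r =>
    (List.range (grid.headD []).length).foldl (fun grids c =>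
      orientations.foldl (fun grids cur_shape =>
        match pvAInner r c cur_shape grid with
        | none => grids
        | some test => grids ++ [test]) grids) grids) []

-- ===== PORT B =====
-- [(sr, sc) for sr in range(len(shape)) for sc in range(len(shape[0])) if shape[sr][sc] == 1]
def pvOffsets (shape : List (List Int)) : List (Nat × Nat) :=
  ((List.range shape.length).flatMap (fun sr =>
    (List.range (shape.headD []).length).map (fun sc => (sr, sc)))).filter
    (fun p => (shape.getD p.1 []).getD p.2 0 = 1)

-- {(i - sr, j - sc) for i, row in enumerate(grid) for j in range(min(len(row), C)) if row[j] == 1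
--  for sr, sc in offs}
def pvBlocked (grid : List (List Int)) (C : Nat) (offs : List (Nat × Nat)) :
    PySem.Set (Int × Int) :=
  PySem.Set.ofList ((PySem.List.enumerate grid).flatMap (fun irow =>
    ((List.range (min irow.2.length C)).filter (fun j => irow.2.getD j 0 = 1)).flatMap (fun j : Nat =>
      offs.map (fun p => (irow.1 - (p.1 : Int), (j : Int) - (p.2 : Int))))))

-- max((sr for sr, _ in offs), default=0)  /  max((sc for _, sc in offs), default=0)
def pvMaxFst (offs : List (Nat × Nat)) : Nat := PySem.List.maxD (offs.map Prod.fst) (fun x => x) 0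
def pvMaxSnd (offs : List (Nat × Nat)) : Nat := PySem.List.maxD (offs.map Prod.snd) (fun x => x) 0

-- new = [row[:] for row in grid]; for sr, sc in offs: new[r+sr][c+sc] = 1
def pvPlace (g : List (List Int)) (r c : Nat) (offs : List (Nat × Nat)) : List (List Int) :=
  offs.foldl (fun t p => t.set (r + p.1) ((t.getD (r + p.1) []).set (c + p.2) 1)) g

def find_and_add_alt (grid : List (List Int)) (orientations : List (List (List Int))) :
    List (List (List Int)) :=
  if grid = [] ∨ grid.headD [] = [] then []
  else
    let R := grid.length
    let C := (grid.headD []).length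
    let tables := orientations.map (fun shape =>
      let offs := pvOffsets shape
      (offs, pvMaxFst offs, pvMaxSnd offs, pvBlocked grid C offs))
    (List.range R).foldl (fun out r =>
      (List.range C).foldl (fun out c =>
        tables.foldl (fun out t =>
          if (decide (r + t.2.1 < R) && decide (c + t.2.2.1 < C) &&
              !(PySem.Set.contains t.2.2.2 ((r : Int), (c : Int)))) = true
          then out ++ [pvPlace grid r c t.1] else out) out) out) []

-- ===== PRECONDITION & SPEC =====
-- Pre_ excludes jagged inputs on a grid with at least one cell: a shape row shorter than the
-- shape's first row (B's offset preprocessing raises IndexError there, and A raises too unless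
-- every scan happens to break first), and a short grid row at a depth some shape's 1s can reach
-- (A's and B's cell accesses raise IndexError there except in unreached corners).
def Pre_find_and_add (grid : List (List Int)) (orientations : List (List (List Int))) : Prop :=
  grid = [] ∨ grid.headD [] = [] ∨
  ((∀ shape ∈ orientations, ∀ row ∈ shape, (shape.headD []).length ≤ row.length) ∧
   (∀ i, i < grid.length → (∃ s ∈ orientations, ∃ row ∈ s.take (i + 1), (1 : Int) ∈ row) →
     (grid.headD []).length ≤ (grid.getD i []).length))
instance (grid : List (List Int)) (orientations : List (List (List Int))) : Decidable (Pre_find_and_add grid orientations) := by unfold Pre_find_and_add; infer_instance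
def pvWitness_find_and_add : List (List Int) × List (List (List Int)) :=
  ([[0, 0], [1, 0]], [[[1, 1]], [[1], [1]]])
def Spec_find_and_add (grid : List (List Int)) (orientations : List (List (List Int))) (out : List (List (List Int))) : Prop := out = find_and_add_alt grid orientations
instance (grid : List (List Int)) (orientations : List (List (List Int))) (out : List (List (List Int))) : Decidable (Spec_find_and_add grid orientations out) := by unfold Spec_find_and_add; infer_instance

-- ===== CLAIM (what is proved, stated in full; the proofs are below) =====
def Claim_equal_find_and_add : Prop := ∀ (grid : List (List Int)) (orientations : List (List (List Int))), Dom_find_and_add grid orientations → Pre_find_and_add grid orientations → Spec_find_and_add grid orientations (find_and_add grid orientations)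

-- ===== LEMMAS AND PROOFS =====

-- A's inner-loop body as a step on single (sr, sc) pairs
def pvStep (shape : List (List Int)) (r c : Nat)
    (st : Option (List (List Int))) (p : Nat × Nat) : Option (List (List Int)) :=
  match st with
  | none => none
  | some t =>
    if (shape.getD p.1 []).getD p.2 0 = 1 then
      if t.length ≤ r + p.1 ∨ (t.headD []).length ≤ c + p.2 ∨
          (t.getD (r + p.1) []).getD (c + p.2) 0 = 1 then none
      else some (pvWrite t (r + p.1) (c + p.2))
    else st

def pvPairs (shape : List (List Int)) : List (Nat × Nat) :=
  (List.range shape.length).flatMap (fun sr =>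
    (List.range (shape.headD []).length).map (fun sc => (sr, sc)))

-- A's validity predicate for one offset against the ORIGINAL grid
def pvOk (g : List (List Int)) (r c : Nat) (p : Nat × Nat) : Bool :=
  decide (r + p.1 < g.length) && decide (c + p.2 < (g.headD []).length) &&
    decide ((g.getD (r + p.1) []).getD (c + p.2) 0 ≠ 1)

theorem pvAInner_eq_foldl_pairs (r c : Nat) (shape t0 : List (List Int)) :
    pvAInner r c shape t0 = (pvPairs shape).foldl (pvStep shape r c) (some t0) := by
  unfold pvAInner pvPairs
  rw [List.foldl_flatMap]
  apply PySem.List.foldl_congr_mem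
  intro st sr _
  rw [List.foldl_map]
  apply PySem.List.foldl_congr_mem
  intro st2 sc _
  cases st2 <;> rfl

theorem pvStep_skip (shape : List (List Int)) (r c : Nat) (st : Option (List (List Int)))
    (p : Nat × Nat) (h : ¬ (shape.getD p.1 []).getD p.2 0 = 1) :
    pvStep shape r c st p = st := by
  cases st with
  | none => rfl
  | some t =>
    have h' : ¬ (shape[p.1]?.getD [])[p.2]?.getD 0 = 1 := by simpa [List.getD] using h
    simp [pvStep, h']

theorem pvStep_none (shape : List (List Int)) (r c : Nat) (l : List (Nat × Nat)) :
    l.foldl (pvStep shape r c) none = none := by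
  induction l with
  | nil => rfl
  | cons p l ih => simpa [pvStep] using ih

theorem pvFoldl_filter_cells (r c : Nat) (shape : List (List Int))
    (l : List (Nat × Nat)) (st : Option (List (List Int))) :
    l.foldl (pvStep shape r c) st =
      (l.filter (fun p => (shape.getD p.1 []).getD p.2 0 = 1)).foldl (pvStep shape r c) st := by
  rw [List.foldl_filter]
  apply PySem.List.foldl_congr_mem
  intro st' p _
  by_cases h : (shape.getD p.1 []).getD p.2 0 = 1
  · have h' : (shape[p.1]?.getD [])[p.2]?.getD 0 = 1 := by simpa [List.getD] using h
    simp [h']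
  · have h' : ¬ (shape[p.1]?.getD [])[p.2]?.getD 0 = 1 := by simpa [List.getD] using h
    simp [h', pvStep_skip shape r c st' p h]

theorem pvWrite_length (t : List (List Int)) (i j : Nat) :
    (pvWrite t i j).length = t.length := by
  simp [pvWrite]

theorem pvWrite_headD_length (t : List (List Int)) (i j : Nat) :
    ((pvWrite t i j).headD []).length = (t.headD []).length := by
  cases t with
  | nil => simp [pvWrite]
  | cons h tl =>
    cases i with
    | zero => simp [pvWrite, List.set]
    | succ n => simp [pvWrite, List.set]

theorem pvWrite_cell_ne (t : List (List Int)) (i j i' j' : Nat)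
    (hi : i < t.length) (hne : i ≠ i' ∨ j ≠ j') :
    ((pvWrite t i j).getD i' []).getD j' 0 = (t.getD i' []).getD j' 0 := by
  rcases hne with h | h
  · simp [pvWrite, List.getD, List.getElem?_set_ne h]
  · by_cases hii : i = i'
    · subst hii
      simp [pvWrite, List.getD, List.getElem?_set_self hi, List.getElem?_set_ne h]
    · simp [pvWrite, List.getD, List.getElem?_set_ne hii]

theorem pvOk_write (g : List (List Int)) (r c : Nat) (p q : Nat × Nat)
    (hp : r + p.1 < g.length) (hne : p ≠ q) :
    pvOk (pvWrite g (r + p.1) (c + p.2)) r c q = pvOk g r c q := by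
  have hcomp : p.1 ≠ q.1 ∨ p.2 ≠ q.2 := by
    by_contra hc
    push Not at hc
    exact hne (Prod.ext hc.1 hc.2)
  have hne' : r + p.1 ≠ r + q.1 ∨ c + p.2 ≠ c + q.2 := by omega
  simp only [pvOk, pvWrite_length, pvWrite_headD_length,
    pvWrite_cell_ne g (r + p.1) (c + p.2) (r + q.1) (c + q.2) hp hne']

theorem pvAll_congr {α : Type} (l : List α) (f g : α → Bool)
    (h : ∀ a ∈ l, f a = g a) : l.all f = l.all g := by
  induction l with
  | nil => rfl
  | cons a l ih => simp [List.all_cons, h a (by simp), ih (fun b hb => h b (by simp [hb]))]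

theorem pvMain (r c : Nat) (shape : List (List Int)) :
    ∀ (offs : List (Nat × Nat)) (g : List (List Int)), offs.Nodup →
      (∀ p ∈ offs, (shape.getD p.1 []).getD p.2 0 = 1) →
      offs.foldl (pvStep shape r c) (some g) =
        (if offs.all (pvOk g r c) then some (pvPlace g r c offs) else none) := by
  intro offs
  induction offs with
  | nil => intro g _ _; simp [pvPlace]
  | cons p offs ih =>
    intro g hnd hcell
    have hc1 : (shape.getD p.1 []).getD p.2 0 = 1 := hcell p (by simp)
    rw [List.foldl_cons]
    by_cases hok : pvOk g r c p = true
    · have hbad : ¬ (g.length ≤ r + p.1 ∨ (g.headD []).length ≤ c + p.2 ∨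
          (g.getD (r + p.1) []).getD (c + p.2) 0 = 1) := by
        simp only [pvOk, Bool.and_eq_true, decide_eq_true_eq] at hok
        push Not
        exact ⟨by omega, by omega, hok.2⟩
      have hc1' : (shape[p.1]?.getD [])[p.2]?.getD 0 = 1 := by simpa [List.getD] using hc1
      have hbad' : ¬ (g.length ≤ r + p.1 ∨ (g.head?.getD []).length ≤ c + p.2 ∨
          (g[r + p.1]?.getD [])[c + p.2]?.getD 0 = 1) := by
        simpa [List.getD, List.headD_eq_head?] using hbad
      have hstep : pvStep shape r c (some g) p = some (pvWrite g (r + p.1) (c + p.2)) := by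
        simp [pvStep, hc1', hbad']
      rw [hstep, ih (pvWrite g (r + p.1) (c + p.2)) (List.Nodup.of_cons hnd)
        (fun q hq => hcell q (by simp [hq]))]
      have hlt : r + p.1 < g.length := by
        simp only [pvOk, Bool.and_eq_true, decide_eq_true_eq] at hok
        exact hok.1.1
      have hall : offs.all (pvOk (pvWrite g (r + p.1) (c + p.2)) r c) = offs.all (pvOk g r c) := by
        refine pvAll_congr _ _ _ (fun q hq => ?_)
        exact pvOk_write g r c p q hlt (fun hpq => (List.nodup_cons.mp hnd).1 (hpq ▸ hq))
      rw [hall]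
      simp only [List.all_cons, hok, Bool.true_and]
      by_cases hrest : offs.all (pvOk g r c) = true
      · simp [hrest, pvPlace, pvWrite]
      · simp [hrest]
    · have hbad : g.length ≤ r + p.1 ∨ (g.headD []).length ≤ c + p.2 ∨
          (g.getD (r + p.1) []).getD (c + p.2) 0 = 1 := by
        simp only [pvOk, Bool.and_eq_true, decide_eq_true_eq] at hok
        by_cases h1 : r + p.1 < g.length
        · by_cases h2 : c + p.2 < (g.headD []).length
          · right; right
            by_contra h3
            exact hok ⟨⟨h1, h2⟩, h3⟩
          · right; left; omega
        · left; omega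
      have hc1' : (shape[p.1]?.getD [])[p.2]?.getD 0 = 1 := by simpa [List.getD] using hc1
      have hbad' : g.length ≤ r + p.1 ∨ (g.head?.getD []).length ≤ c + p.2 ∨
          (g[r + p.1]?.getD [])[c + p.2]?.getD 0 = 1 := by
        simpa [List.getD, List.headD_eq_head?] using hbad
      have hstep : pvStep shape r c (some g) p = none := by
        simp [pvStep, hc1', hbad']
      rw [hstep, pvStep_none]
      have : pvOk g r c p = false := by simpa using hok
      simp [List.all_cons, this]

theorem pvOffsets_nodup (shape : List (List Int)) : (pvOffsets shape).Nodup := by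
  unfold pvOffsets
  refine List.Nodup.filter _ ?_
  exact List.Nodup.product (List.nodup_range) (List.nodup_range)

theorem pvOffsets_cells (shape : List (List Int)) :
    ∀ p ∈ pvOffsets shape, (shape.getD p.1 []).getD p.2 0 = 1 := by
  intro p hp
  have := (List.mem_filter.mp hp).2
  simpa using this

theorem pvAInner_eq (r c : Nat) (shape g : List (List Int)) :
    pvAInner r c shape g =
      (if (pvOffsets shape).all (pvOk g r c) then some (pvPlace g r c (pvOffsets shape))
       else none) := by
  rw [pvAInner_eq_foldl_pairs, pvFoldl_filter_cells]
  have hpairs : (pvPairs shape).filter (fun p => (shape.getD p.1 []).getD p.2 0 = 1)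
      = pvOffsets shape := rfl
  rw [hpairs]
  exact pvMain r c shape (pvOffsets shape) g (pvOffsets_nodup shape) (pvOffsets_cells shape)

-- B side: characterisations of the bounds maxima and the blocked set

theorem pvMaxFst_iff (offs : List (Nat × Nat)) (r R : Nat) (hr : r < R) :
    r + pvMaxFst offs < R ↔ ∀ p ∈ offs, r + p.1 < R := by
  unfold pvMaxFst
  cases offs with
  | nil => simp [PySem.List.maxD_nil]; omega
  | cons q l =>
    constructor
    · intro h p hp
      have := PySem.List.le_key_maxD ((q :: l).map Prod.fst) (fun x => x) 0 (by simp)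
        p.1 (List.mem_map_of_mem hp)
      simp only at this
      omega
    · intro h
      have hmem := PySem.List.maxD_mem ((q :: l).map Prod.fst) (fun x => x) 0 (by simp)
      obtain ⟨p, hp, hep⟩ := List.mem_map.mp hmem
      have := h p hp
      omega

theorem pvMaxSnd_iff (offs : List (Nat × Nat)) (c C : Nat) (hc : c < C) :
    c + pvMaxSnd offs < C ↔ ∀ p ∈ offs, c + p.2 < C := by
  unfold pvMaxSnd
  cases offs with
  | nil => simp [PySem.List.maxD_nil]; omega
  | cons q l =>
    constructor
    · intro h p hp
      have := PySem.List.le_key_maxD ((q :: l).map Prod.snd) (fun x => x) 0 (by simp)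
        p.2 (List.mem_map_of_mem hp)
      simp only at this
      omega
    · intro h
      have hmem := PySem.List.maxD_mem ((q :: l).map Prod.snd) (fun x => x) 0 (by simp)
      obtain ⟨p, hp, hep⟩ := List.mem_map.mp hmem
      have := h p hp
      omega

theorem mem_pvBlocked (grid : List (List Int)) (C : Nat) (offs : List (Nat × Nat)) (r c : Nat) :
    ((r : Int), (c : Int)) ∈ pvBlocked grid C offs ↔
      ∃ p ∈ offs, c + p.2 < C ∧ (grid.getD (r + p.1) []).getD (c + p.2) 0 = 1 := by
  unfold pvBlocked
  rw [PySem.Set.mem_ofList]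
  constructor
  · intro h
    obtain ⟨irow, hirow, h⟩ := List.mem_flatMap.mp h
    obtain ⟨j, hj, h⟩ := List.mem_flatMap.mp h
    obtain ⟨p, hp, hpe⟩ := List.mem_map.mp h
    obtain ⟨k, hk, hkeq⟩ := (PySem.List.mem_enumerate_iff _ _ _).mp hirow
    subst hkeq
    obtain ⟨hjr, hj1⟩ := List.mem_filter.mp hj
    have hjr' := List.mem_range.mp hjr
    have hcell : (grid[k]).getD j 0 = 1 := of_decide_eq_true hj1
    rw [Prod.mk.injEq] at hpe
    obtain ⟨he1, he2⟩ := hpe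
    simp only at he1 he2 hjr' hcell
    have hkr : k = r + p.1 := by omega
    have hjc : j = c + p.2 := by omega
    refine ⟨p, hp, by omega, ?_⟩
    rw [← hkr, ← hjc]
    have hgd : grid.getD k [] = grid[k] := by
      simp [List.getD_eq_getElem?_getD, List.getElem?_eq_getElem hk]
    rw [hgd]
    exact hcell
  · rintro ⟨p, hp, hcC, hcell⟩
    have hklt : r + p.1 < grid.length := by
      by_contra hge
      have hnil : grid.getD (r + p.1) [] = ([] : List Int) := by
        simp [List.getD_eq_getElem?_getD, List.getElem?_eq_none (show grid.length ≤ r + p.1 by omega)]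
      rw [hnil] at hcell
      simp at hcell
    have hrow : grid.getD (r + p.1) [] = grid[r + p.1] := by
      simp [List.getD_eq_getElem?_getD, List.getElem?_eq_getElem hklt]
    rw [hrow] at hcell
    have hjlt : c + p.2 < (grid[r + p.1]).length := by
      by_contra hge
      have hz : (grid[r + p.1]).getD (c + p.2) 0 = 0 := by
        simp [List.getD_eq_getElem?_getD,
          List.getElem?_eq_none (show (grid[r + p.1]).length ≤ c + p.2 by omega)]
      rw [hz] at hcell
      simp at hcell
    refine List.mem_flatMap.mpr ⟨((0 : Int) + ((r + p.1 : Nat) : Int), grid[r + p.1]),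
      (PySem.List.mem_enumerate_iff _ _ _).mpr ⟨r + p.1, hklt, rfl⟩, ?_⟩
    refine List.mem_flatMap.mpr ⟨c + p.2, List.mem_filter.mpr
      ⟨List.mem_range.mpr (by show c + p.2 < min (grid[r + p.1]).length C; omega), decide_eq_true hcell⟩, ?_⟩
    refine List.mem_map.mpr ⟨p, hp, ?_⟩
    rw [Prod.mk.injEq]
    exact ⟨by omega, by omega⟩

-- B's table test equals A's per-offset all-check, for anchors inside the grid rectangle
theorem pvCond_eq (grid : List (List Int)) (offs : List (Nat × Nat)) (r c : Nat)
    (hr : r < grid.length) (hc : c < (grid.headD []).length) :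
    (decide (r + pvMaxFst offs < grid.length) &&
     decide (c + pvMaxSnd offs < (grid.headD []).length) &&
     !(PySem.Set.contains (pvBlocked grid (grid.headD []).length offs) ((r : Int), (c : Int))))
      = offs.all (pvOk grid r c) := by
  rw [Bool.eq_iff_iff]
  simp only [Bool.and_eq_true, Bool.not_eq_true', decide_eq_true_eq, List.all_eq_true]
  rw [pvMaxFst_iff offs r grid.length hr, pvMaxSnd_iff offs c (grid.headD []).length hc]
  have hcont : PySem.Set.contains (pvBlocked grid (grid.headD []).length offs)
      ((r : Int), (c : Int)) = false ↔
      ¬ ((r : Int), (c : Int)) ∈ pvBlocked grid (grid.headD []).length offs := by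
    simp [PySem.Set.contains]
  rw [hcont, mem_pvBlocked]
  simp only [pvOk, Bool.and_eq_true, decide_eq_true_eq]
  constructor
  · rintro ⟨⟨hR, hC⟩, hnb⟩ p hp
    exact ⟨⟨hR p hp, hC p hp⟩, fun hcell => hnb ⟨p, hp, hC p hp, hcell⟩⟩
  · intro h
    refine ⟨⟨fun p hp => (h p hp).1.1, fun p hp => (h p hp).1.2⟩, ?_⟩
    rintro ⟨p, hp, _, hcell⟩
    exact (h p hp).2 hcell

theorem pv_eq (grid : List (List Int)) (orientations : List (List (List Int))) :
    find_and_add grid orientations = find_and_add_alt grid orientations := by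
  unfold find_and_add find_and_add_alt
  by_cases hdeg : grid = [] ∨ grid.headD [] = []
  case pos =>
    rw [if_pos hdeg]
    rcases hdeg with h | h
    · subst h; simp
    · rw [h]; simp
  case neg =>
  rw [if_neg hdeg]
  simp only [List.foldl_map]
  apply PySem.List.foldl_congr_mem
  intro gs r hrmem
  have hr : r < grid.length := List.mem_range.mp hrmem
  apply PySem.List.foldl_congr_mem
  intro gs' c hcmem
  have hc : c < (grid.headD []).length := List.mem_range.mp hcmem
  apply PySem.List.foldl_congr_mem
  intro gs'' shape _
  rw [pvAInner_eq, pvCond_eq grid (pvOffsets shape) r c hr hc]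
  by_cases h : (pvOffsets shape).all (pvOk grid r c) = true
  · simp [h]
  · simp [h]

-- ===== VERDICT (by name: the statement is the Claim_ definition above) =====
theorem find_and_add_spec : Claim_equal_find_and_add := by
  intro grid orientations _ _
  exact pv_eq grid orientations
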